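-- pv_equiv track=rewrite | github.com/MaksWisniewski/syntax-aware-language-model-for-code-generation | segmentation/.ipynb_checkpoints/code_segmentation-checkpoint.py | extract_control_structure_span
-- ===== SOURCE A (Python) =====
-- from typing import List, Tuple, Optional
--
-- def extract_control_structure_span(tokens: List[str], control_tag: str) -> List[Tuple[int, int]]:
--     spans = []
--     i = 0
--     while i < len(tokens):
--         if tokens[i] == control_tag:
--             header_start = i
--             while i < len(tokens) and tokens[i] != "[INDENT]":
--                 i += 1
--             if i < len(tokens) and tokens[i] == "[INDENT]":
--                 depth = 1
--                 block_start = i + 1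
--                 i += 1
--                 while i < len(tokens) and depth > 0:
--                     if tokens[i] == "[INDENT]":
--                         depth += 1
--                     elif tokens[i] == "[DEDENT]":
--                         depth -= 1
--                     i += 1
--                 spans.append((header_start, i - 1))
--         else:
--             i += 1
--     return spans
-- ===== SOURCE B (Python) =====
-- def extract_control_structure_span(tokens, control_tag):
--     n = len(tokens)
--     # First pass: match each [INDENT] index to its closing [DEDENT] index.
--     match = {}
--     stack = []
--     for j, tok in enumerate(tokens):
--         if tok == "[INDENT]":
--             stack.append(j)
--         elif tok == "[DEDENT]":
--             if stack:
--                 match[stack.pop()] = j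
--     # Second pass: for each control tag, jump to its block's end via the map.
--     spans = []
--     i = 0
--     while i < n:
--         if tokens[i] != control_tag:
--             i += 1
--             continue
--         p = i
--         while p < n and tokens[p] != "[INDENT]":
--             p += 1
--         if p == n:
--             break
--         d = match.get(p, n - 1)
--         spans.append((i, d))
--         i = d + 1
--     return spans
-- ===== Notes on version B (the rewrite author's own statement) =====
-- stated objective: alternative
-- what changed: Replaces A's per-header depth-counting inner loop by a global stack pass that precomputes each [INDENT]'s matching [DEDENT] in a dict, which the span scan then looks up to jump directly to each block's end.
import Mathlib
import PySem

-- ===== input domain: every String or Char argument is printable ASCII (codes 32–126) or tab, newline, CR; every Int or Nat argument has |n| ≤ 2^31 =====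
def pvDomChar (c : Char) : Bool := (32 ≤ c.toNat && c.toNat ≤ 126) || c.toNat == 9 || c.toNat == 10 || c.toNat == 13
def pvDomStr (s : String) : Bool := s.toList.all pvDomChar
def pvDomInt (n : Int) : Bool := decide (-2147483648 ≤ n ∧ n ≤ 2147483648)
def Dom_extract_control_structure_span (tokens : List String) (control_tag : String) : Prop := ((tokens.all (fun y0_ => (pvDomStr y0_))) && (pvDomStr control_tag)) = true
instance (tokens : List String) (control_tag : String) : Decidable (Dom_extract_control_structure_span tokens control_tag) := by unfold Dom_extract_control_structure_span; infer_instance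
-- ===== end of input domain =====

-- B replaces A's per-header depth-counting inner loop by one global stack pass that records each
-- [INDENT]'s matching [DEDENT] in a dict, then a scan that jumps via that map (alternative decomposition).
-- All loops are transliterated as structural recursion on a fuel argument (tokens.length, enough for
-- every loop here since each step advances the index); the fuel is only a totality guard.

-- ===== PORT A =====
-- inner `while i < len(tokens) and tokens[i] != "[INDENT]"` scan
def findA (tokens : List String) (fuel i : Nat) : Nat :=
  match fuel with
  | 0 => i
  | fuel + 1 =>
    if i < tokens.length then
      if tokens.getD i "" = "[INDENT]" then i else findA tokens fuel (i + 1)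
    else i

-- inner `while i < len(tokens) and depth > 0` loop; returns the final (i, depth)
def closeA (tokens : List String) (fuel i depth : Nat) : Nat × Nat :=
  match fuel with
  | 0 => (i, depth)
  | fuel + 1 =>
    if i < tokens.length ∧ 0 < depth then
      closeA tokens fuel (i + 1)
        (if tokens.getD i "" = "[INDENT]" then depth + 1
         else if tokens.getD i "" = "[DEDENT]" then depth - 1 else depth)
    else (i, depth)

-- the outer `while i < len(tokens)` loop of A
def scanA (tokens : List String) (control_tag : String) (fuel i : Nat) : List (Int × Int) :=
  match fuel with
  | 0 => []
  | fuel + 1 =>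
    if i < tokens.length then
      if tokens.getD i "" = control_tag then
        if findA tokens tokens.length i < tokens.length then
          ((i : Int), ((closeA tokens tokens.length (findA tokens tokens.length i + 1) 1).1 : Int) - 1)
            :: scanA tokens control_tag fuel (closeA tokens tokens.length (findA tokens tokens.length i + 1) 1).1
        else []
      else scanA tokens control_tag fuel (i + 1)
    else []

def extract_control_structure_span (tokens : List String) (control_tag : String) : List (Int × Int) :=
  scanA tokens control_tag tokens.length 0

-- ===== PORT B =====
-- first pass: stack-match every [INDENT] index to its [DEDENT] index
def buildB (tokens : List String) (fuel j : Nat) (st : List Nat) (acc : PySem.Dict Nat Nat) :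
    PySem.Dict Nat Nat :=
  match fuel with
  | 0 => acc
  | fuel + 1 =>
    if j < tokens.length then
      if tokens.getD j "" = "[INDENT]" then buildB tokens fuel (j + 1) (j :: st) acc
      else if tokens.getD j "" = "[DEDENT]" then
        if st = [] then buildB tokens fuel (j + 1) [] acc
        else buildB tokens fuel (j + 1) st.tail (acc.insert st.headI j)
      else buildB tokens fuel (j + 1) st acc
    else acc

-- the `while p < n and tokens[p] != "[INDENT]"` scan of B
def findB (tokens : List String) (fuel p : Nat) : Nat :=
  match fuel with
  | 0 => p
  | fuel + 1 =>
    if p < tokens.length then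
      if tokens.getD p "" = "[INDENT]" then p else findB tokens fuel (p + 1)
    else p

-- the second-pass `while i < n` loop of B
def scanB (tokens : List String) (control_tag : String) (fuel i : Nat) : List (Int × Int) :=
  match fuel with
  | 0 => []
  | fuel + 1 =>
    if i < tokens.length then
      if tokens.getD i "" ≠ control_tag then scanB tokens control_tag fuel (i + 1)
      else
        if findB tokens tokens.length i < tokens.length then
          ((i : Int),
            (((buildB tokens tokens.length 0 [] PySem.Dict.empty).getD (findB tokens tokens.length i) (tokens.length - 1)) : Int))
            :: scanB tokens control_tag fuel
                ((buildB tokens tokens.length 0 [] PySem.Dict.empty).getD (findB tokens tokens.length i) (tokens.length - 1) + 1)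
        else []
    else []

def extract_control_structure_span_alt (tokens : List String) (control_tag : String) :
    List (Int × Int) :=
  scanB tokens control_tag tokens.length 0

-- ===== PRECONDITION & SPEC =====
def Spec_extract_control_structure_span (tokens : List String) (control_tag : String) (out : List (Int × Int)) : Prop := out = extract_control_structure_span_alt tokens control_tag
instance (tokens : List String) (control_tag : String) (out : List (Int × Int)) : Decidable (Spec_extract_control_structure_span tokens control_tag out) := by unfold Spec_extract_control_structure_span; infer_instance

-- ===== CLAIM (what is proved, stated in full; the proofs are below) =====
def Claim_equal_extract_control_structure_span : Prop := ∀ (tokens : List String) (control_tag : String), Dom_extract_control_structure_span tokens control_tag → Spec_extract_control_structure_span tokens control_tag (extract_control_structure_span tokens control_tag)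

-- ===== LEMMAS AND PROOFS =====

lemma findA_ge (tokens : List String) : ∀ (fuel i : Nat), i ≤ findA tokens fuel i := by
  intro fuel
  induction fuel with
  | zero => intro i; simp [findA]
  | succ fuel ih =>
    intro i
    simp only [findA]
    split
    · split
      · exact Nat.le_refl i
      · exact le_trans (by omega) (ih (i + 1))
    · exact Nat.le_refl i

lemma closeA_ge (tokens : List String) :
    ∀ (fuel i depth : Nat), i ≤ (closeA tokens fuel i depth).1 := by
  intro fuel
  induction fuel with
  | zero => intro i depth; simp [closeA]
  | succ fuel ih =>
    intro i depth
    simp only [closeA]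
    split
    · exact le_trans (by omega) (ih (i + 1) _)
    · exact Nat.le_refl i

-- a loop whose guard fails returns immediately, whatever the fuel
lemma closeA_stop (tokens : List String) (fuel i depth : Nat)
    (h : ¬ (i < tokens.length ∧ 0 < depth)) : closeA tokens fuel i depth = (i, depth) := by
  cases fuel with
  | zero => rfl
  | succ fuel => simp only [closeA, if_neg h]

-- if A's depth counter never returns to 0, it stops at the end of the token list
lemma closeA_stuck (tokens : List String) :
    ∀ (fuel i depth : Nat), tokens.length - i ≤ fuel → i ≤ tokens.length →
      (closeA tokens fuel i depth).2 ≠ 0 → (closeA tokens fuel i depth).1 = tokens.length := by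
  intro fuel
  induction fuel with
  | zero =>
    intro i depth hn hi h2
    simp only [closeA] at h2 ⊢
    omega
  | succ fuel ih =>
    intro i depth hn hi h2
    simp only [closeA] at h2 ⊢
    by_cases hg : i < tokens.length ∧ 0 < depth
    · rw [if_pos hg] at h2 ⊢
      exact ih (i + 1) _ (by omega) (by omega) h2
    · rw [if_neg hg] at h2 ⊢
      omega

-- keys below j and outside the stack are never touched again
lemma buildB_get_frozen (tokens : List String) :
    ∀ (fuel j : Nat) (st : List Nat) (acc : PySem.Dict Nat Nat) (q : Nat),
      q < j → q ∉ st → (buildB tokens fuel j st acc).get? q = acc.get? q := by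
  intro fuel
  induction fuel with
  | zero => intro j st acc q _ _; rfl
  | succ fuel ih =>
    intro j st acc q hq hqst
    simp only [buildB]
    by_cases hj : j < tokens.length
    · rw [if_pos hj]
      by_cases hI : tokens.getD j "" = "[INDENT]"
      · rw [if_pos hI]
        exact ih (j + 1) (j :: st) acc q (by omega)
          (by intro h
              rcases List.mem_cons.1 h with h | h
              · omega
              · exact hqst h)
      · by_cases hD : tokens.getD j "" = "[DEDENT]"
        · rw [if_neg hI, if_pos hD]
          cases st with
          | nil =>
            rw [if_pos rfl]
            exact ih (j + 1) [] acc q (by omega) (by simp)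
          | cons r rest =>
            rw [if_neg (by simp)]
            simp only [List.tail_cons, List.headI_cons]
            rw [ih (j + 1) rest (acc.insert r j) q (by omega)
              (fun h => hqst (List.mem_cons_of_mem _ h))]
            rw [PySem.Dict.get?_insert]
            rw [if_neg (show ¬ q = r from fun h => hqst (h ▸ List.mem_cons_self ..))]
        · rw [if_neg hI, if_neg hD]
          exact ih (j + 1) st acc q (by omega) hqst
    · rw [if_neg hj]

-- the stack element at depth k is matched exactly where A's depth counter (started at k+1) returns 0
lemma buildB_get_stack (tokens : List String) :
    ∀ (fuel j : Nat) (st : List Nat) (acc : PySem.Dict Nat Nat) (k : Nat) (hk : k < st.length)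
      (m : Nat), tokens.length - j ≤ fuel → tokens.length - j ≤ m →
      st.Nodup → (∀ q ∈ st, q < j) →
      (∀ q, (q ∈ st ∨ j ≤ q) → acc.get? q = none) →
      (buildB tokens fuel j st acc).get? (st[k]'hk) =
        (if (closeA tokens m j (k + 1)).2 = 0 then some ((closeA tokens m j (k + 1)).1 - 1) else none) := by
  intro fuel
  induction fuel with
  | zero =>
    intro j st acc k hk m hn hm hnd hst hacc
    have hj : ¬ j < tokens.length := by omega
    rw [closeA_stop tokens m j (k + 1) (by omega)]
    simp only [buildB, show ¬ (k + 1 = 0) by omega, if_false]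
    exact hacc _ (Or.inl (List.getElem_mem hk))
  | succ fuel ih =>
    intro j st acc k hk m hn hm hnd hst hacc
    by_cases hj : j < tokens.length
    · obtain ⟨m', rfl⟩ : ∃ m', m = m' + 1 := ⟨m - 1, by omega⟩
      simp only [buildB, closeA]
      rw [if_pos hj, if_pos (show j < tokens.length ∧ 0 < k + 1 from ⟨hj, by omega⟩)]
      by_cases hI : tokens.getD j "" = "[INDENT]"
      · rw [if_pos hI, if_pos hI]
        have hk' : k + 1 < (j :: st).length := by simp; omega
        have hel : (j :: st)[k + 1]'hk' = st[k]'hk := by simp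
        rw [← hel]
        exact ih (j + 1) (j :: st) acc (k + 1) hk' m' (by omega) (by omega)
          (List.nodup_cons.2 ⟨fun h => absurd (hst j h) (by omega), hnd⟩)
          (by intro q hq; rcases List.mem_cons.1 hq with h | h; omega; exact (hst q h).trans (by omega))
          (by intro q hq
              apply hacc
              rcases hq with h | h
              · rcases List.mem_cons.1 h with h | h
                · exact Or.inr (by omega)
                · exact Or.inl h
              · exact Or.inr (by omega))
      · by_cases hD : tokens.getD j "" = "[DEDENT]"
        · rw [if_neg hI, if_pos hD, if_neg hI, if_pos hD]
          cases st with
          | nil => simp at hk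
          | cons q rest =>
            rw [if_neg (by simp)]
            simp only [List.tail_cons, List.headI_cons]
            cases k with
            | zero =>
              simp only [List.getElem_cons_zero]
              rw [buildB_get_frozen tokens fuel (j + 1) rest (acc.insert q j) q
                (by have := hst q (List.mem_cons_self ..); omega)
                ((List.nodup_cons.1 hnd).1)]
              rw [PySem.Dict.get?_insert, if_pos rfl]
              rw [closeA_stop tokens m' (j + 1) (0 + 1 - 1) (by omega)]
              simp
            | succ n =>
              have hn' : n < rest.length := by simp at hk; omega
              have hel : (q :: rest)[n + 1]'hk = rest[n]'hn' := by simp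
              rw [hel]
              rw [ih (j + 1) rest (acc.insert q j) n hn' m' (by omega) (by omega)
                ((List.nodup_cons.1 hnd).2)
                (by intro r hr; exact (hst r (List.mem_cons_of_mem _ hr)).trans (by omega))
                (by intro r hr
                    rw [PySem.Dict.get?_insert]
                    have hrq : ¬ r = q := by
                      rcases hr with h | h
                      · exact fun hh => (List.nodup_cons.1 hnd).1 (hh ▸ h)
                      · have := hst q (List.mem_cons_self ..); omega
                    rw [if_neg hrq]
                    apply hacc
                    rcases hr with h | h
                    · exact Or.inl (List.mem_cons_of_mem _ h)
                    · exact Or.inr (by omega))]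
              simp only [show n + 1 + 1 - 1 = n + 1 from rfl]
        · rw [if_neg hI, if_neg hD, if_neg hI, if_neg hD]
          exact ih (j + 1) st acc k hk m' (by omega) (by omega) hnd
            (by intro q hq; exact (hst q hq).trans (by omega))
            (by intro q hq
                apply hacc
                rcases hq with h | h
                · exact Or.inl h
                · exact Or.inr (by omega))
    · rw [closeA_stop tokens m j (k + 1) (by omega)]
      simp only [buildB, if_neg hj, show ¬ (k + 1 = 0) by omega, if_false]
      exact hacc _ (Or.inl (List.getElem_mem hk))

-- the final map at an [INDENT] position p agrees with A's depth counter started just after p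
lemma buildB_get_indent (tokens : List String) :
    ∀ (fuel j : Nat) (st : List Nat) (acc : PySem.Dict Nat Nat) (p m : Nat),
      tokens.length - j ≤ fuel → tokens.length - p ≤ m + 1 →
      st.Nodup → (∀ q ∈ st, q < j) →
      (∀ q, (q ∈ st ∨ j ≤ q) → acc.get? q = none) →
      j ≤ p → p < tokens.length → tokens.getD p "" = "[INDENT]" →
      (buildB tokens fuel j st acc).get? p =
        (if (closeA tokens m (p + 1) 1).2 = 0 then some ((closeA tokens m (p + 1) 1).1 - 1) else none) := by
  intro fuel
  induction fuel with
  | zero => intro j st acc p m hn _ _ _ _ hjp hp _; omega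
  | succ fuel ih =>
    intro j st acc p m hn hm hnd hst hacc hjp hp hIND
    have hj : j < tokens.length := by omega
    by_cases hjp' : j = p
    · subst hjp'
      simp only [buildB]
      rw [if_pos hj, if_pos hIND]
      have hk : (0 : Nat) < (j :: st).length := by simp
      have hel : (j :: st)[0]'hk = j := rfl
      rw [← hel]
      exact buildB_get_stack tokens fuel (j + 1) (j :: st) acc 0 hk m (by omega) (by omega)
        (List.nodup_cons.2 ⟨fun h => absurd (hst j h) (by omega), hnd⟩)
        (by intro q hq; rcases List.mem_cons.1 hq with h | h; omega; exact (hst q h).trans (by omega))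
        (by intro q hq
            apply hacc
            rcases hq with h | h
            · rcases List.mem_cons.1 h with h | h
              · exact Or.inr (by omega)
              · exact Or.inl h
            · exact Or.inr (by omega))
    · simp only [buildB]
      rw [if_pos hj]
      by_cases hI : tokens.getD j "" = "[INDENT]"
      · rw [if_pos hI]
        exact ih (j + 1) (j :: st) acc p m (by omega) hm
          (List.nodup_cons.2 ⟨fun h => absurd (hst j h) (by omega), hnd⟩)
          (by intro q hq; rcases List.mem_cons.1 hq with h | h; omega; exact (hst q h).trans (by omega))
          (by intro q hq
              apply hacc
              rcases hq with h | h
              · rcases List.mem_cons.1 h with h | h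
                · exact Or.inr (by omega)
                · exact Or.inl h
              · exact Or.inr (by omega))
          (by omega) hp hIND
      · by_cases hD : tokens.getD j "" = "[DEDENT]"
        · rw [if_neg hI, if_pos hD]
          cases st with
          | nil =>
            rw [if_pos rfl]
            exact ih (j + 1) [] acc p m (by omega) hm (by simp) (by simp)
              (by intro q hq; apply hacc; rcases hq with h | h; simp at h; exact Or.inr (by omega))
              (by omega) hp hIND
          | cons q rest =>
            rw [if_neg (by simp)]
            simp only [List.tail_cons, List.headI_cons]
            exact ih (j + 1) rest (acc.insert q j) p m (by omega) hm
              ((List.nodup_cons.1 hnd).2)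
              (by intro r hr; exact (hst r (List.mem_cons_of_mem _ hr)).trans (by omega))
              (by intro r hr
                  rw [PySem.Dict.get?_insert]
                  have hrq : ¬ r = q := by
                    rcases hr with h | h
                    · exact fun hh => (List.nodup_cons.1 hnd).1 (hh ▸ h)
                    · have := hst q (List.mem_cons_self ..); omega
                  rw [if_neg hrq]
                  apply hacc
                  rcases hr with h | h
                  · exact Or.inl (List.mem_cons_of_mem _ h)
                  · exact Or.inr (by omega))
              (by omega) hp hIND
        · rw [if_neg hI, if_neg hD]
          exact ih (j + 1) st acc p m (by omega) hm hnd
            (by intro r hr; exact (hst r hr).trans (by omega))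
            (by intro r hr
                apply hacc
                rcases hr with h | h
                · exact Or.inl h
                · exact Or.inr (by omega))
            (by omega) hp hIND

lemma findA_eq_findB (tokens : List String) :
    ∀ (fuel i : Nat), findA tokens fuel i = findB tokens fuel i := by
  intro fuel
  induction fuel with
  | zero => intro i; rfl
  | succ fuel ih =>
    intro i
    simp only [findA, findB]
    by_cases hi : i < tokens.length
    · rw [if_pos hi, if_pos hi]
      by_cases hI : tokens.getD i "" = "[INDENT]"
      · rw [if_pos hI, if_pos hI]
      · rw [if_neg hI, if_neg hI]
        exact ih (i + 1)
    · rw [if_neg hi, if_neg hi]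

lemma findA_indent (tokens : List String) :
    ∀ (fuel i : Nat), tokens.length - i ≤ fuel → findA tokens fuel i < tokens.length →
      tokens.getD (findA tokens fuel i) "" = "[INDENT]" := by
  intro fuel
  induction fuel with
  | zero =>
    intro i hn hlt
    simp only [findA] at hlt
    omega
  | succ fuel ih =>
    intro i hn hlt
    simp only [findA] at hlt ⊢
    by_cases hi : i < tokens.length
    · rw [if_pos hi] at hlt ⊢
      by_cases hI : tokens.getD i "" = "[INDENT]"
      · rw [if_pos hI]
        exact hI
      · rw [if_neg hI] at hlt ⊢
        exact ih (i + 1) (by omega) hlt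
    · rw [if_neg hi] at hlt
      omega

-- the main simulation: A's scan and B's scan produce the same spans from any start index
lemma scan_eq (tokens : List String) (ct : String) :
    ∀ (fuel i : Nat), scanA tokens ct fuel i = scanB tokens ct fuel i := by
  intro fuel
  induction fuel with
  | zero => intro i; rfl
  | succ fuel ih =>
    intro i
    simp only [scanA, scanB]
    by_cases hi : i < tokens.length
    · rw [if_pos hi, if_pos hi]
      by_cases hct : tokens.getD i "" = ct
      · rw [if_pos hct, if_neg (not_not_intro hct)]
        have hfB : findB tokens tokens.length i = findA tokens tokens.length i :=
          (findA_eq_findB tokens tokens.length i).symm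
        rw [hfB]
        by_cases hflt : findA tokens tokens.length i < tokens.length
        · rw [if_pos hflt, if_pos hflt]
          have hfge : i ≤ findA tokens tokens.length i := findA_ge tokens tokens.length i
          have hIND : tokens.getD (findA tokens tokens.length i) "" = "[INDENT]" :=
            findA_indent tokens tokens.length i (by omega) hflt
          have hge : findA tokens tokens.length i + 1 ≤
              (closeA tokens tokens.length (findA tokens tokens.length i + 1) 1).1 :=
            closeA_ge tokens tokens.length (findA tokens tokens.length i + 1) 1
          have hm : (buildB tokens tokens.length 0 [] PySem.Dict.empty).get? (findA tokens tokens.length i) =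
              (if (closeA tokens tokens.length (findA tokens tokens.length i + 1) 1).2 = 0
               then some ((closeA tokens tokens.length (findA tokens tokens.length i + 1) 1).1 - 1) else none) :=
            buildB_get_indent tokens tokens.length 0 [] PySem.Dict.empty (findA tokens tokens.length i)
              tokens.length (by omega) (by omega) (by simp) (by simp)
              (by intro q _; exact PySem.Dict.get?_empty q)
              (by omega) hflt hIND
          have hd : (buildB tokens tokens.length 0 [] PySem.Dict.empty).getD (findA tokens tokens.length i)
              (tokens.length - 1) = (closeA tokens tokens.length (findA tokens tokens.length i + 1) 1).1 - 1 := by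
            by_cases hc2 : (closeA tokens tokens.length (findA tokens tokens.length i + 1) 1).2 = 0
            · rw [if_pos hc2] at hm
              exact PySem.Dict.getD_of_get?_eq_some _ _ hm
            · rw [if_neg hc2] at hm
              rw [PySem.Dict.getD_of_get?_eq_none _ _ hm]
              rw [closeA_stuck tokens tokens.length (findA tokens tokens.length i + 1) 1
                (by omega) (by omega) hc2]
          rw [hd]
          rw [show (closeA tokens tokens.length (findA tokens tokens.length i + 1) 1).1 - 1 + 1 =
                (closeA tokens tokens.length (findA tokens tokens.length i + 1) 1).1 by omega,
            ih (closeA tokens tokens.length (findA tokens tokens.length i + 1) 1).1]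
          have h1 : 1 ≤ (closeA tokens tokens.length (findA tokens tokens.length i + 1) 1).1 := by omega
          rw [List.cons_eq_cons, Prod.mk.injEq]
          exact ⟨⟨rfl, by omega⟩, rfl⟩
        · rw [if_neg hflt, if_neg hflt]
      · rw [if_neg hct, if_pos hct]
        exact ih (i + 1)
    · rw [if_neg hi, if_neg hi]

-- ===== VERDICT (by name: the statement is the Claim_ definition above) =====
theorem extract_control_structure_span_spec : Claim_equal_extract_control_structure_span := by
  intro tokens ct _
  unfold Spec_extract_control_structure_span extract_control_structure_span
    extract_control_structure_span_alt
  exact scan_eq tokens ct tokens.length 0
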